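-- pv_equiv track=rewrite | github.com/Allae-Ghayat/Traductor-C-ensamblador | Traductor/src/MemoryOperations.py | read_variable_in_memory
-- ===== SOURCE A (Python) =====
-- def read_variable_in_memory(variable_identifier, stack, global_variables):
--     stack_copy = stack.copy()
--     variable_exists = False
--     variable_value = None
--
--     while (len(stack_copy) != 0) and not variable_exists:
--         scope_variables = stack_copy.pop()
--         if variable_identifier in scope_variables:
--             variable_exists = True
--             variable_value = scope_variables[variable_identifier]
--
--     if variable_exists:
--         return variable_value
--     elif variable_identifier in global_variables:
--         return global_variables[variable_identifier]
--     else: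
--         # TODO: change to a more expressive Exception...
--         raise Exception("Variable named {} is not defined.".format(variable_identifier))
-- ===== SOURCE B (Python) =====
-- def read_variable_in_memory(variable_identifier, stack, global_variables):
--     merged = dict(global_variables)
--     for scope in stack:
--         merged.update(scope)
--     if variable_identifier in merged:
--         return merged[variable_identifier]
--     raise Exception("Variable named {} is not defined.".format(variable_identifier))
-- ===== Notes on version B (the rewrite author's own statement) =====
-- stated objective: simpler
-- what changed: Replaces the pop-and-scan while loop with early exit by building one merged dict (globals first, then each scope bottom-to-top via dict.update) followed by a single membership test and lookup.
import Mathlib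
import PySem

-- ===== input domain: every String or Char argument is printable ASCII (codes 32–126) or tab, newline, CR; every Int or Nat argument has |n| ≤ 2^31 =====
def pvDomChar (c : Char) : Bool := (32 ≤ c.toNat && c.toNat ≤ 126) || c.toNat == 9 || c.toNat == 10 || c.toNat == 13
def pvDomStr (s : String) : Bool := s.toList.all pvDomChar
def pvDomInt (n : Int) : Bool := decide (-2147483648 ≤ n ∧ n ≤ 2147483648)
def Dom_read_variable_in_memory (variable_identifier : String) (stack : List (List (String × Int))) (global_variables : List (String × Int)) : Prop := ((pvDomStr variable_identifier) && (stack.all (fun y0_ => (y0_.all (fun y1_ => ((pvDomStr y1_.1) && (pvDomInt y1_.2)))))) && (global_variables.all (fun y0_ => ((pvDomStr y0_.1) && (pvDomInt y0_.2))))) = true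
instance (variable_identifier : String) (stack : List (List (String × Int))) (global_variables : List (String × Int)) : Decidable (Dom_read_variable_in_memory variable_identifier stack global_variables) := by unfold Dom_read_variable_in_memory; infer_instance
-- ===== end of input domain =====

-- B replaces A's pop-and-scan-with-early-exit while loop by building one merged dict
-- (globals, then each scope bottom-to-top) followed by a single lookup; objective: simpler.

-- ===== PORT A =====
-- the while loop pops from the END of stack_copy; recursing over stack.reverse is that loop
def readLoopA (variable_identifier : String) : List (List (String × Int)) → Option Int
  | [] => none
  | sc :: rest =>
      if (PySem.Dict.mk sc).contains variable_identifier then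
        (PySem.Dict.mk sc).get? variable_identifier
      else readLoopA variable_identifier rest

def read_variable_in_memory (variable_identifier : String) (stack : List (List (String × Int))) (global_variables : List (String × Int)) : Int :=
  match readLoopA variable_identifier stack.reverse with
  | some v => v
  | none =>
      if (PySem.Dict.mk global_variables).contains variable_identifier then
        ((PySem.Dict.mk global_variables).get? variable_identifier).getD 0
      else 0  -- Python raises Exception here; excluded by Pre_

-- ===== PORT B =====
def read_variable_in_memory_alt (variable_identifier : String) (stack : List (List (String × Int))) (global_variables : List (String × Int)) : Int :=
  let merged := stack.foldl (fun d sc => d.update sc) (PySem.Dict.mk global_variables)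
  if merged.contains variable_identifier then
    (merged.get? variable_identifier).getD 0
  else 0  -- Python raises Exception here; excluded by Pre_

-- ===== PRECONDITION & SPEC =====
-- Pre_ excludes (a) inputs where the variable is defined nowhere, on which A raises Exception,
-- and (b) association lists with duplicate keys, which do not represent any Python dict
-- (a Python dict always has distinct keys), so nothing about the Pythons is claimed there.
def Pre_read_variable_in_memory (variable_identifier : String) (stack : List (List (String × Int))) (global_variables : List (String × Int)) : Prop :=
  (stack.any (fun sc => (PySem.Dict.mk sc).contains variable_identifier)
    || (PySem.Dict.mk global_variables).contains variable_identifier) = true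
  ∧ (∀ sc ∈ stack, (sc.map Prod.fst).Nodup)
  ∧ (global_variables.map Prod.fst).Nodup
instance (variable_identifier : String) (stack : List (List (String × Int))) (global_variables : List (String × Int)) : Decidable (Pre_read_variable_in_memory variable_identifier stack global_variables) := by unfold Pre_read_variable_in_memory; infer_instance

def pvWitness_read_variable_in_memory : String × (List (List (String × Int))) × (List (String × Int)) :=
  ("x", [[("y", 5)], [("x", 3)]], [("x", 1), ("z", 2)])

def Spec_read_variable_in_memory (variable_identifier : String) (stack : List (List (String × Int))) (global_variables : List (String × Int)) (out : Int) : Prop := out = read_variable_in_memory_alt variable_identifier stack global_variables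
instance (variable_identifier : String) (stack : List (List (String × Int))) (global_variables : List (String × Int)) (out : Int) : Decidable (Spec_read_variable_in_memory variable_identifier stack global_variables out) := by unfold Spec_read_variable_in_memory; infer_instance

-- ===== CLAIM (what is proved, stated in full; the proofs are below) =====
def Claim_equal_read_variable_in_memory : Prop := ∀ (variable_identifier : String) (stack : List (List (String × Int))) (global_variables : List (String × Int)), Dom_read_variable_in_memory variable_identifier stack global_variables → Pre_read_variable_in_memory variable_identifier stack global_variables → Spec_read_variable_in_memory variable_identifier stack global_variables (read_variable_in_memory variable_identifier stack global_variables)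

-- ===== LEMMAS AND PROOFS =====

-- update d ps is a left fold of insert
theorem update_eq_foldl (d : PySem.Dict String Int) (ps : List (String × Int)) :
    d.update ps = ps.foldl (fun d p => d.insert p.1 p.2) d := rfl

theorem get?_foldl_insert_of_not_mem (d : PySem.Dict String Int) (ps : List (String × Int))
    (v : String) (h : v ∉ ps.map Prod.fst) :
    (ps.foldl (fun d p => d.insert p.1 p.2) d).get? v = d.get? v := by
  induction ps generalizing d with
  | nil => rfl
  | cons p rest ih =>
      simp only [List.map, List.mem_cons, not_or] at h
      simp only [List.foldl]
      rw [ih _ h.2]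
      simp [PySem.Dict.get?_insert, h.1]

theorem get?_update_nodup (d : PySem.Dict String Int) (ps : List (String × Int))
    (hnd : (ps.map Prod.fst).Nodup) (v : String) :
    (d.update ps).get? v =
      match (PySem.Dict.mk ps).get? v with
      | some x => some x
      | none => d.get? v := by
  rw [update_eq_foldl]
  induction ps generalizing d with
  | nil => rfl
  | cons p rest ih =>
      obtain ⟨k, w⟩ := p
      simp only [List.map, List.nodup_cons] at hnd
      simp only [List.foldl]
      by_cases hv : v = k
      · subst hv
        rw [get?_foldl_insert_of_not_mem _ _ _ hnd.1, PySem.Dict.get?_insert_self]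
        simp [PySem.Dict.get?_mk_cons]
      · have hhead : ((PySem.Dict.mk ((k, w) :: rest)).get? v) = (PySem.Dict.mk rest).get? v := by
          simp [PySem.Dict.get?_mk_cons, Ne.symm hv]
        rw [ih _ hnd.2, hhead]
        rcases hr : (PySem.Dict.mk rest).get? v with _ | x <;>
          simp [PySem.Dict.get?_insert, hv]

theorem merged_get? (v : String) (l : List (List (String × Int))) (d : PySem.Dict String Int)
    (h : ∀ sc ∈ l, (sc.map Prod.fst).Nodup) :
    (l.reverse.foldl (fun d sc => d.update sc) d).get? v =
      match readLoopA v l with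
      | some x => some x
      | none => d.get? v := by
  induction l generalizing d with
  | nil => rfl
  | cons sc rest ih =>
      simp only [List.reverse_cons, List.foldl_append, List.foldl_cons, List.foldl_nil]
      rw [get?_update_nodup _ _ (h sc (by simp)) v]
      simp only [readLoopA]
      by_cases hc : (PySem.Dict.mk sc).contains v = true
      · rw [PySem.Dict.contains_eq_isSome_get?] at hc
        cases hget : (PySem.Dict.mk sc).get? v with
        | none => rw [hget] at hc; simp at hc
        | some x => simp [hget, PySem.Dict.contains_eq_isSome_get?]
      · have hnone : (PySem.Dict.mk sc).get? v = none := by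
          rw [PySem.Dict.contains_eq_isSome_get?] at hc
          cases hget : (PySem.Dict.mk sc).get? v with
          | none => rfl
          | some x => rw [hget] at hc; simp at hc
        simp only [hnone, hc]
        exact ih _ (fun s hs => h s (by simp [hs]))

-- ===== VERDICT (by name: the statement is the Claim_ definition above) =====
theorem read_variable_in_memory_spec : Claim_equal_read_variable_in_memory := by
  intro v stack gl _hDom hPre
  unfold Spec_read_variable_in_memory read_variable_in_memory read_variable_in_memory_alt
  have hmg : (stack.foldl (fun d sc => d.update sc) (PySem.Dict.mk gl)).get? v =
      match readLoopA v stack.reverse with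
      | some x => some x
      | none => (PySem.Dict.mk gl).get? v := by
    have := merged_get? v stack.reverse (PySem.Dict.mk gl)
      (fun sc hsc => hPre.2.1 sc (List.mem_reverse.mp hsc))
    simpa using this
  cases hA : readLoopA v stack.reverse with
  | some x =>
      rw [hA] at hmg
      simp only at hmg
      have hc : (stack.foldl (fun d sc => d.update sc) (PySem.Dict.mk gl)).contains v = true := by
        rw [PySem.Dict.contains_eq_isSome_get?, hmg]; rfl
      simp [hc, hmg]
  | none =>
      rw [hA] at hmg
      simp only at hmg
      have hc : (stack.foldl (fun d sc => d.update sc) (PySem.Dict.mk gl)).contains v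
          = (PySem.Dict.mk gl).contains v := by
        rw [PySem.Dict.contains_eq_isSome_get?, hmg, ← PySem.Dict.contains_eq_isSome_get?]
      simp only [hmg, hc]
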